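-- pv_equiv track=rewrite | github.com/dvir001/Simple-Org-Chart | simple_org_chart/hierarchy.py | collect_unique_field_values
-- ===== SOURCE A (Python) =====
-- from typing import Any, Dict, List, Optional
--
-- def collect_unique_field_values(
--     employees: Optional[List[Dict[str, Any]]],
--     field_name: str,
-- ) -> List[str]:
--     """Collect unique, deduplicated values for a given field."""
--     unique = {}
--     for employee in employees or []:
--         value = (employee.get(field_name) or '').strip()
--         if not value:
--             continue
--         key = value.lower()
--         if key not in unique:
--             unique[key] = value
--
--     return sorted(unique.values(), key=lambda item: item.lower())
-- ===== SOURCE B (Python) =====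
-- def collect_unique_field_values(employees, field_name):
--     """Collect unique, deduplicated values for a given field.
--
--     Alternative strategy: gather all non-empty stripped values, stable-sort
--     them by lowercase key, then emit one representative per case-insensitive
--     group in a single adjacent-dedup pass (stability keeps the first-seen
--     spelling, matching the dict-based original).
--     """
--     values = []
--     for employee in employees or []:
--         value = (employee.get(field_name) or '').strip()
--         if value:
--             values.append(value)
--     values.sort(key=str.lower)
--     result = []
--     prev = None
--     for value in values:
--         key = value.lower()
--         if prev != key:
--             result.append(value)
--             prev = key
--     return result
-- ===== Notes on version B (the rewrite author's own statement) =====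
-- stated objective: alternative
-- what changed: Replaces the first-seen dict keyed by lowercase plus a final key-sort with a stable sort of all collected values by lowercase followed by a single adjacent-dedup pass (stability preserves the first-seen representative per case-insensitive group).
import Mathlib
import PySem

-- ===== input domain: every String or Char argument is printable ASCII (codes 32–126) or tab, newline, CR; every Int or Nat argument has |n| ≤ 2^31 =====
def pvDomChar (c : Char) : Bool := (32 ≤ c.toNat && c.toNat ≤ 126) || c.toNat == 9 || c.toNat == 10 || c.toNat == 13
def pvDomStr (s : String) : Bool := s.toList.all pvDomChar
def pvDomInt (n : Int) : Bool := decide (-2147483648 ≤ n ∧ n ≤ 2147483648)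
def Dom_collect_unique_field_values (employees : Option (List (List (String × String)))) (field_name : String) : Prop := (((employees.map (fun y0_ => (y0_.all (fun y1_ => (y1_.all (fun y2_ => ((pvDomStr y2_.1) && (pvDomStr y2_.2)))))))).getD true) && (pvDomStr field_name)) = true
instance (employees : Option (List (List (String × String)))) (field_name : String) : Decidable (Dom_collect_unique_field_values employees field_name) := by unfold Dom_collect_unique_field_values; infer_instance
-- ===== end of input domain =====

-- B replaces A's first-seen dict keyed by lowercase plus a final key-sort by a stable sort of all
-- collected values followed by one adjacent-dedup pass (objective: alternative, same cost).

-- shared helper: the expression `(employee.get(field_name) or '').strip()` both Pythons contain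
def pvFieldValue (employee : List (String × String)) (field_name : String) : String :=
  PySem.Str.strip (((PySem.Dict.mk employee).get? field_name).getD "")

-- ===== PORT A =====
def collect_unique_field_values (employees : Option (List (List (String × String)))) (field_name : String) : List String :=
  let unique : PySem.Dict String String :=
    (employees.getD []).foldl (fun unique employee =>
      let value := pvFieldValue employee field_name
      if value = "" then unique
      else
        let key := PySem.Str.lower value
        if unique.contains key then unique else unique.insert key value)
      PySem.Dict.empty
  PySem.List.sorted unique.values (fun item => PySem.Str.lower item) false

-- ===== PORT B =====
def collect_unique_field_values_alt (employees : Option (List (List (String × String)))) (field_name : String) : List String :=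
  let values : List String :=
    (employees.getD []).foldl (fun acc employee =>
      let value := pvFieldValue employee field_name
      if value = "" then acc else acc ++ [value]) []
  let sortedValues := PySem.List.sorted values (fun v => PySem.Str.lower v) false
  (sortedValues.foldl (fun (st : List String × Option String) value =>
      let key := PySem.Str.lower value
      if st.2 = some key then st else (st.1 ++ [value], some key)) ([], none)).1

-- ===== PRECONDITION & SPEC =====
def Spec_collect_unique_field_values (employees : Option (List (List (String × String)))) (field_name : String) (out : List String) : Prop := out = collect_unique_field_values_alt employees field_name
instance (employees : Option (List (List (String × String)))) (field_name : String) (out : List String) : Decidable (Spec_collect_unique_field_values employees field_name out) := by unfold Spec_collect_unique_field_values; infer_instance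

-- ===== CLAIM (what is proved, stated in full; the proofs are below) =====
def Claim_equal_collect_unique_field_values : Prop := ∀ (employees : Option (List (List (String × String)))) (field_name : String), Dom_collect_unique_field_values employees field_name → Spec_collect_unique_field_values employees field_name (collect_unique_field_values employees field_name)

-- ===== LEMMAS AND PROOFS =====

-- the list of non-empty stripped field values, in input order
def pvExtract (emps : List (List (String × String))) (fn : String) : List String :=
  (emps.filter (fun e => !decide (pvFieldValue e fn = ""))).map (fun e => pvFieldValue e fn)

-- A's dedup, phrased with an explicit `seen` list of lowercase keys
def pvDD : List String → List String → List String
  | _, [] => []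
  | seen, v :: vs =>
    if PySem.Str.lower v ∈ seen then pvDD seen vs
    else v :: pvDD (seen ++ [PySem.Str.lower v]) vs

-- canonical first-representative-per-lowercase-class dedup (fuel ≥ list length)
def pvKeep : Nat → List String → List String
  | _, [] => []
  | 0, _ :: _ => []
  | n + 1, v :: vs =>
    v :: pvKeep n (vs.filter (fun w => !decide (PySem.Str.lower w = PySem.Str.lower v)))

-- B's adjacent dedup carrying the previously emitted key
def pvAdj : Option String → List String → List String
  | _, [] => []
  | k, v :: vs =>
    if k = some (PySem.Str.lower v) then pvAdj k vs
    else v :: pvAdj (some (PySem.Str.lower v)) vs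

theorem pvB_extract (emps : List (List (String × String))) (fn : String) (acc : List String) :
    emps.foldl (fun acc employee =>
      if pvFieldValue employee fn = "" then acc else acc ++ [pvFieldValue employee fn]) acc
      = acc ++ pvExtract emps fn := by
  induction emps generalizing acc with
  | nil => simp [pvExtract]
  | cons e es ih =>
    simp only [List.foldl_cons]
    rw [ih]
    by_cases h : pvFieldValue e fn = "" <;>
      simp [pvExtract, List.filter_cons, h]

theorem pvDict_insert_values (d : PySem.Dict String String) (k v : String)
    (h : d.contains k = false) : (d.insert k v).values = d.values ++ [v] := by
  simp [PySem.Dict.insert, h, PySem.Dict.values]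

theorem pvDict_insert_keys (d : PySem.Dict String String) (k v : String)
    (h : d.contains k = false) : (d.insert k v).keys = d.keys ++ [k] := by
  simp [PySem.Dict.insert, h, PySem.Dict.keys]

theorem pvA_values (emps : List (List (String × String))) (fn : String) (d : PySem.Dict String String) :
    (emps.foldl (fun unique employee =>
      if pvFieldValue employee fn = "" then unique
      else
        if unique.contains (PySem.Str.lower (pvFieldValue employee fn)) then unique
        else unique.insert (PySem.Str.lower (pvFieldValue employee fn)) (pvFieldValue employee fn)) d).values
      = d.values ++ pvDD d.keys (pvExtract emps fn) := by
  induction emps generalizing d with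
  | nil => simp [pvExtract, pvDD]
  | cons e es ih =>
    simp only [List.foldl_cons]
    rw [ih]
    by_cases hv : pvFieldValue e fn = ""
    · simp [hv, pvExtract, List.filter_cons]
    · rw [if_neg hv]
      have hx : pvExtract (e :: es) fn = pvFieldValue e fn :: pvExtract es fn := by
        simp [pvExtract, List.filter_cons, hv]
      by_cases hc : d.contains (PySem.Str.lower (pvFieldValue e fn)) = true
      · rw [if_pos hc]
        have hm : PySem.Str.lower (pvFieldValue e fn) ∈ d.keys := by
          simpa [PySem.Dict.contains_eq_decide_mem_keys] using hc
        rw [hx, pvDD, if_pos hm]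
      · rw [if_neg hc]
        have hc' : d.contains (PySem.Str.lower (pvFieldValue e fn)) = false := by
          simpa using hc
        have hm : PySem.Str.lower (pvFieldValue e fn) ∉ d.keys := by
          simpa [PySem.Dict.contains_eq_decide_mem_keys] using hc
        rw [pvDict_insert_values d _ _ hc', pvDict_insert_keys d _ _ hc']
        rw [hx, pvDD, if_neg hm]
        simp [List.append_assoc]

theorem pvKeep_fuel : ∀ (n m : Nat) (l : List String), l.length ≤ n → l.length ≤ m →
    pvKeep n l = pvKeep m l := by
  intro n
  induction n with
  | zero =>
    intro m l hn _
    cases l with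
    | nil => cases m <;> simp [pvKeep]
    | cons w ws => simp at hn
  | succ n ih =>
    intro m l hn hm
    cases l with
    | nil => cases m <;> simp [pvKeep]
    | cons w ws =>
      cases m with
      | zero => simp at hm
      | succ m =>
        have h1 : ws.length ≤ n := by simpa using hn
        have h2 : ws.length ≤ m := by simpa using hm
        rw [pvKeep, pvKeep]
        rw [ih m _ (le_trans (List.length_filter_le _ _) h1)
          (le_trans (List.length_filter_le _ _) h2)]

theorem pvDD_eq_keep : ∀ (n : Nat) (vs seen : List String), vs.length ≤ n →
    pvDD seen vs = pvKeep n (vs.filter (fun w => !decide (PySem.Str.lower w ∈ seen))) := by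
  intro n
  induction n with
  | zero =>
    intro vs seen h
    cases vs with
    | nil => simp [pvDD, pvKeep]
    | cons w ws => simp at h
  | succ n ih =>
    intro vs seen h
    cases vs with
    | nil => simp [pvDD, pvKeep]
    | cons v vs =>
      have hvs : vs.length ≤ n := by simpa using h
      by_cases hm : PySem.Str.lower v ∈ seen
      · rw [pvDD, if_pos hm, ih vs seen hvs]
        have hfc : (v :: vs).filter (fun w => !decide (PySem.Str.lower w ∈ seen))
            = vs.filter (fun w => !decide (PySem.Str.lower w ∈ seen)) := by
          simp [List.filter_cons, hm]
        rw [hfc]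
        exact pvKeep_fuel n (n + 1) _ (le_trans (List.length_filter_le _ _) hvs)
          (le_trans (le_trans (List.length_filter_le _ _) hvs) (Nat.le_succ n))
      · rw [pvDD, if_neg hm, ih vs (seen ++ [PySem.Str.lower v]) hvs]
        have hfc : (v :: vs).filter (fun w => !decide (PySem.Str.lower w ∈ seen))
            = v :: vs.filter (fun w => !decide (PySem.Str.lower w ∈ seen)) := by
          simp [List.filter_cons, hm]
        rw [hfc, pvKeep]
        congr 1
        rw [List.filter_filter]
        have hpp : List.filter (fun w => !decide (PySem.Str.lower w ∈ seen ++ [PySem.Str.lower v])) vs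
            = List.filter (fun a => !decide (PySem.Str.lower a = PySem.Str.lower v)
                && !decide (PySem.Str.lower a ∈ seen)) vs := by
          apply List.filter_congr
          intro x _
          by_cases h1 : PySem.Str.lower x = PySem.Str.lower v <;>
            by_cases h2 : PySem.Str.lower x ∈ seen <;>
              simp [h1, h2, List.mem_append, hm]
        rw [hpp]

theorem pvKeep_mem_sub : ∀ (n : Nat) (l : List String), l.length ≤ n →
    ∀ v ∈ pvKeep n l, v ∈ l := by
  intro n
  induction n with
  | zero =>
    intro l hl v hv
    cases l with
    | nil => simp [pvKeep] at hv
    | cons w ws => simp at hl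
  | succ n ih =>
    intro l hl v hv
    cases l with
    | nil => simp [pvKeep] at hv
    | cons w ws =>
      have hws : ws.length ≤ n := by simpa using hl
      rw [pvKeep] at hv
      rcases List.mem_cons.mp hv with h | h
      · simp [h]
      · have hlen : (ws.filter (fun x => !decide (PySem.Str.lower x = PySem.Str.lower w))).length ≤ n :=
          le_trans (List.length_filter_le _ _) hws
        exact List.mem_cons_of_mem _ (List.mem_of_mem_filter (ih _ hlen v h))

theorem pvKeep_nodup_aux : ∀ (n : Nat) (l : List String), l.length ≤ n →
    ((pvKeep n l).map (fun w => PySem.Str.lower w)).Nodup := by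
  intro n
  induction n with
  | zero =>
    intro l hl
    cases l with
    | nil => simp [pvKeep]
    | cons w ws => simp at hl
  | succ n ih =>
    intro l hl
    cases l with
    | nil => simp [pvKeep]
    | cons w ws =>
      have hws : ws.length ≤ n := by simpa using hl
      rw [pvKeep]
      simp only [List.map_cons]
      refine List.nodup_cons.mpr ⟨?_, ih _ (le_trans (List.length_filter_le _ _) hws)⟩
      intro hmem
      rcases List.mem_map.mp hmem with ⟨u, hu, hequ⟩
      have hu' := List.of_mem_filter (pvKeep_mem_sub n _ (le_trans (List.length_filter_le _ _) hws) u hu)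
      simp [hequ] at hu'

theorem pvKeep_mem_aux : ∀ (n : Nat) (l : List String), l.length ≤ n → ∀ v,
    (v ∈ pvKeep n l ↔ (l.filter (fun w => decide (PySem.Str.lower w = PySem.Str.lower v))).head? = some v) := by
  intro n
  induction n with
  | zero =>
    intro l hl v
    cases l with
    | nil => simp [pvKeep]
    | cons w ws => simp at hl
  | succ n ih =>
    intro l hl v
    cases l with
    | nil => simp [pvKeep]
    | cons w ws =>
      have hws : ws.length ≤ n := by simpa using hl
      rw [pvKeep]
      by_cases hk : PySem.Str.lower w = PySem.Str.lower v
      · constructor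
        · intro hv
          rcases List.mem_cons.mp hv with h | h
          · subst h; simp [List.filter_cons, hk]
          · exfalso
            have hf := List.of_mem_filter (pvKeep_mem_sub n _
              (le_trans (List.length_filter_le _ _) hws) v h)
            rw [hk] at hf
            simp at hf
        · intro hh
          rw [List.filter_cons, if_pos (by simpa using hk)] at hh
          simp only [List.head?_cons, Option.some.injEq] at hh
          simp [hh]
      · have hfilter : (w :: ws).filter (fun w' => decide (PySem.Str.lower w' = PySem.Str.lower v))
            = ws.filter (fun w' => decide (PySem.Str.lower w' = PySem.Str.lower v)) := by
          simp [List.filter_cons, hk]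
        rw [hfilter]
        have hne : ¬ v = w := fun h => hk (by rw [h])
        rw [List.mem_cons]
        have ih' := ih (ws.filter (fun w' => !decide (PySem.Str.lower w' = PySem.Str.lower w)))
          (le_trans (List.length_filter_le _ _) hws) v
        rw [List.filter_filter] at ih'
        have hpred : ws.filter (fun a => decide (PySem.Str.lower a = PySem.Str.lower v)
              && !decide (PySem.Str.lower a = PySem.Str.lower w))
            = ws.filter (fun a => decide (PySem.Str.lower a = PySem.Str.lower v)) := by
          apply List.filter_congr
          intro x _
          by_cases hx : PySem.Str.lower x = PySem.Str.lower v
          · simp [hx, Ne.symm hk]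
          · simp [hx]
        rw [hpred] at ih'
        rw [ih']
        simp [hne]

theorem pvAdj_some : ∀ (l : List String) (c : String),
    l.Pairwise (fun a b => PySem.Str.lower a ≤ PySem.Str.lower b) →
    (∀ w ∈ l, c ≤ PySem.Str.lower w) →
    pvAdj (some c) l = pvAdj none (l.filter (fun w => !decide (PySem.Str.lower w = c))) := by
  intro l
  induction l with
  | nil => intro c _ _; simp [pvAdj]
  | cons w ws ih =>
    intro c hp hb
    rcases List.pairwise_cons.mp hp with ⟨hw, hp'⟩
    by_cases h : PySem.Str.lower w = c
    · rw [pvAdj, if_pos (by rw [h])]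
      have hfc : (w :: ws).filter (fun x => !decide (PySem.Str.lower x = c))
          = ws.filter (fun x => !decide (PySem.Str.lower x = c)) := by
        simp [List.filter_cons, h]
      rw [hfc]
      exact ih c hp' (fun u hu => h ▸ hw u hu)
    · have hcw : c < PySem.Str.lower w :=
        lt_of_le_of_ne (hb w (by simp)) (fun hEq => h hEq.symm)
      rw [pvAdj, if_neg (show ¬ (some c = some (PySem.Str.lower w)) from
        fun hEq => h (Option.some.inj hEq).symm)]
      have hall : ∀ x ∈ ws, (!decide (PySem.Str.lower x = c)) = true := by
        intro x hx
        have hlt : c < PySem.Str.lower x := lt_of_lt_of_le hcw (hw x hx)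
        simp [ne_of_gt hlt]
      have hfc : (w :: ws).filter (fun x => !decide (PySem.Str.lower x = c)) = w :: ws := by
        rw [List.filter_cons, if_pos (by simpa using ne_of_gt hcw), List.filter_eq_self.mpr hall]
      rw [hfc, pvAdj, if_neg (by simp)]

theorem pvAdj_keep_aux : ∀ (n : Nat) (l : List String), l.length ≤ n →
    l.Pairwise (fun a b => PySem.Str.lower a ≤ PySem.Str.lower b) →
    pvAdj none l = pvKeep n l := by
  intro n
  induction n with
  | zero =>
    intro l hl hp
    cases l with
    | nil => simp [pvAdj, pvKeep]
    | cons w ws => simp at hl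
  | succ n ih =>
    intro l hl hp
    cases l with
    | nil => simp [pvAdj, pvKeep]
    | cons w ws =>
      have hws : ws.length ≤ n := by simpa using hl
      rcases List.pairwise_cons.mp hp with ⟨hw, hp'⟩
      rw [pvAdj, if_neg (by simp)]
      rw [pvAdj_some ws (PySem.Str.lower w) hp' hw]
      rw [ih _ (le_trans (List.length_filter_le _ _) hws) (hp'.filter _)]
      rw [pvKeep]

theorem pvAdj_some_lt : ∀ (l : List String) (c : String),
    l.Pairwise (fun a b => PySem.Str.lower a ≤ PySem.Str.lower b) →
    (∀ w ∈ l, c ≤ PySem.Str.lower w) →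
    ((pvAdj (some c) l).Pairwise (fun a b => PySem.Str.lower a < PySem.Str.lower b) ∧
      ∀ w ∈ pvAdj (some c) l, c < PySem.Str.lower w) := by
  intro l
  induction l with
  | nil => intro c _ _; simp [pvAdj]
  | cons w ws ih =>
    intro c hp hb
    rcases List.pairwise_cons.mp hp with ⟨hw, hp'⟩
    by_cases h : c = PySem.Str.lower w
    · rw [pvAdj, if_pos (by rw [h])]
      exact ih c hp' (fun u hu => le_trans (le_of_eq h) (hw u hu))
    · have hcw : c < PySem.Str.lower w := lt_of_le_of_ne (hb w (by simp)) h
      rw [pvAdj, if_neg (show ¬ (some c = some (PySem.Str.lower w)) from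
        fun hEq => h (Option.some.inj hEq))]
      obtain ⟨hpair, hgt⟩ := ih (PySem.Str.lower w) hp' hw
      constructor
      · exact List.pairwise_cons.mpr ⟨fun u hu => hgt u hu, hpair⟩
      · intro u hu
        rcases List.mem_cons.mp hu with h1 | h1
        · rw [h1]; exact hcw
        · exact lt_trans hcw (hgt u h1)

theorem pvAdj_none_lt (l : List String)
    (hp : l.Pairwise (fun a b => PySem.Str.lower a ≤ PySem.Str.lower b)) :
    (pvAdj none l).Pairwise (fun a b => PySem.Str.lower a < PySem.Str.lower b) := by
  cases l with
  | nil => simp [pvAdj]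
  | cons w ws =>
    rcases List.pairwise_cons.mp hp with ⟨hw, hp'⟩
    rw [pvAdj, if_neg (by simp)]
    obtain ⟨hpair, hgt⟩ := pvAdj_some_lt ws (PySem.Str.lower w) hp' hw
    exact List.pairwise_cons.mpr ⟨hgt, hpair⟩

-- stability of PySem's insertion sort for one lowercase class
theorem pvS1 (c x : String) (hx : ¬ PySem.Str.lower x = c) (bef : String → String → Bool) :
    ∀ ys : List String, (PySem.List.insertBy bef x ys).filter (fun w => decide (PySem.Str.lower w = c))
      = ys.filter (fun w => decide (PySem.Str.lower w = c)) := by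
  intro ys
  induction ys with
  | nil => simp [PySem.List.insertBy, hx]
  | cons y ys ih =>
    rw [PySem.List.insertBy]
    by_cases hb : bef x y = true
    · rw [if_pos hb]
      simp [List.filter_cons, hx]
    · rw [if_neg hb]
      simp [List.filter_cons, ih]

theorem pvS2 (c x : String) (hx : PySem.Str.lower x = c) :
    ∀ ys : List String, ys.Pairwise (fun a b => PySem.Str.lower a ≤ PySem.Str.lower b) →
    (PySem.List.insertBy (fun a b => decide (PySem.Str.lower a < PySem.Str.lower b)) x ys).filter
        (fun w => decide (PySem.Str.lower w = c))
      = ys.filter (fun w => decide (PySem.Str.lower w = c)) ++ [x] := by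
  intro ys
  induction ys with
  | nil => intro _; simp [PySem.List.insertBy, hx]
  | cons y ys ih =>
    intro hp
    rcases List.pairwise_cons.mp hp with ⟨hy, hp'⟩
    rw [PySem.List.insertBy]
    by_cases hb : (fun a b => decide (PySem.Str.lower a < PySem.Str.lower b)) x y = true
    · rw [if_pos hb]
      have hxy : PySem.Str.lower x < PySem.Str.lower y := of_decide_eq_true hb
      have hnil : (y :: ys).filter (fun w => decide (PySem.Str.lower w = c)) = [] := by
        rw [List.filter_eq_nil_iff]
        intro u hu
        have h1 : PySem.Str.lower y ≤ PySem.Str.lower u := by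
          rcases List.mem_cons.mp hu with h | h
          · rw [h]
          · exact hy u h
        have h2 : c < PySem.Str.lower u := lt_of_lt_of_le (hx ▸ hxy) h1
        simp [ne_of_gt h2]
      rw [List.filter_cons, hnil]
      simp [hx]
    · rw [if_neg hb]
      rw [List.filter_cons, List.filter_cons, ih hp']
      by_cases hy' : PySem.Str.lower y = c <;> simp [hy']

theorem pvS3 (x : String) :
    ∀ ys : List String, ys.Pairwise (fun a b => PySem.Str.lower a ≤ PySem.Str.lower b) →
    (PySem.List.insertBy (fun a b => decide (PySem.Str.lower a < PySem.Str.lower b)) x ys).Pairwise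
      (fun a b => PySem.Str.lower a ≤ PySem.Str.lower b) := by
  intro ys
  induction ys with
  | nil => intro _; simp [PySem.List.insertBy]
  | cons y ys ih =>
    intro hp
    rcases List.pairwise_cons.mp hp with ⟨hy, hp'⟩
    rw [PySem.List.insertBy]
    by_cases hb : (fun a b => decide (PySem.Str.lower a < PySem.Str.lower b)) x y = true
    · rw [if_pos hb]
      have hxy : PySem.Str.lower x ≤ PySem.Str.lower y := le_of_lt (of_decide_eq_true hb)
      refine List.pairwise_cons.mpr ⟨?_, hp⟩
      intro u hu
      rcases List.mem_cons.mp hu with h | h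
      · rw [h]; exact hxy
      · exact le_trans hxy (hy u h)
    · rw [if_neg hb]
      have hyx : PySem.Str.lower y ≤ PySem.Str.lower x := by
        have h1 : ¬ PySem.Str.lower x < PySem.Str.lower y := by simpa using hb
        exact le_of_not_gt h1
      refine List.pairwise_cons.mpr ⟨?_, ih hp'⟩
      intro u hu
      rcases (PySem.List.mem_insertBy _ _ _ _).mp hu with h | h
      · rw [h]; exact hyx
      · exact hy u h

theorem pvS4 (c : String) : ∀ (l acc : List String),
    acc.Pairwise (fun a b => PySem.Str.lower a ≤ PySem.Str.lower b) →
    (l.foldl (fun acc x =>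
        PySem.List.insertBy (fun a b => decide (PySem.Str.lower a < PySem.Str.lower b)) x acc) acc).filter
        (fun w => decide (PySem.Str.lower w = c))
      = acc.filter (fun w => decide (PySem.Str.lower w = c))
        ++ l.filter (fun w => decide (PySem.Str.lower w = c)) := by
  intro l
  induction l with
  | nil => intro acc _; simp
  | cons x l ih =>
    intro acc hacc
    rw [List.foldl_cons]
    rw [ih _ (pvS3 x acc hacc)]
    by_cases hx : PySem.Str.lower x = c
    · rw [pvS2 c x hx acc hacc]
      simp [List.filter_cons, hx, List.append_assoc]
    · rw [pvS1 c x hx _ acc]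
      simp [List.filter_cons, hx]

theorem pv_filter_sorted (l : List String) (c : String) :
    (PySem.List.sorted l (fun v => PySem.Str.lower v) false).filter
        (fun w => decide (PySem.Str.lower w = c))
      = l.filter (fun w => decide (PySem.Str.lower w = c)) := by
  rw [PySem.List.sorted_eq_foldl_insertBy]
  rw [pvS4 c l [] (by simp)]
  simp

theorem pvB_fold_adj : ∀ (S : List String) (res : List String) (k : Option String),
    (S.foldl (fun (st : List String × Option String) value =>
      if st.2 = some (PySem.Str.lower value) then st
      else (st.1 ++ [value], some (PySem.Str.lower value))) (res, k)).1
      = res ++ pvAdj k S := by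
  intro S
  induction S with
  | nil => intro res k; simp [pvAdj]
  | cons v vs ih =>
    intro res k
    rw [List.foldl_cons]
    by_cases h : k = some (PySem.Str.lower v)
    · rw [pvAdj, if_pos h, if_pos h]
      exact ih res k
    · rw [pvAdj, if_neg h, if_neg h]
      have h2 := ih (res ++ [v]) (some (PySem.Str.lower v))
      simpa [List.append_assoc] using h2

-- ===== VERDICT (by name: the statement is the Claim_ definition above) =====
theorem collect_unique_field_values_spec : Claim_equal_collect_unique_field_values := by
  intro employees field_name _
  unfold Spec_collect_unique_field_values
  simp only [collect_unique_field_values, collect_unique_field_values_alt]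
  rw [pvA_values (employees.getD []) field_name PySem.Dict.empty]
  rw [pvB_extract (employees.getD []) field_name []]
  rw [pvB_fold_adj]
  have hve : (PySem.Dict.empty : PySem.Dict String String).values = [] := rfl
  have hke : (PySem.Dict.empty : PySem.Dict String String).keys = [] := rfl
  rw [hve, hke, List.nil_append, List.nil_append, List.nil_append]
  rw [pvDD_eq_keep (pvExtract (employees.getD []) field_name).length
    (pvExtract (employees.getD []) field_name) [] le_rfl]
  have hid : (pvExtract (employees.getD []) field_name).filter
      (fun w => !decide (PySem.Str.lower w ∈ ([] : List String)))
      = pvExtract (employees.getD []) field_name := List.filter_eq_self.mpr (by simp)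
  rw [hid]
  have hS : (PySem.List.sorted (pvExtract (employees.getD []) field_name)
      (fun v => PySem.Str.lower v) false).Pairwise
      (fun a b => PySem.Str.lower a ≤ PySem.Str.lower b) :=
    PySem.List.sorted_pairwise _ _
  apply PySem.List.sorted_eq_of_perm_of_pairwise_lt
  · rw [pvAdj_keep_aux _ _ le_rfl hS]
    refine (List.perm_ext_iff_of_nodup ?_ ?_).mpr ?_
    · exact List.Nodup.of_map _ (pvKeep_nodup_aux _ _ le_rfl)
    · exact List.Nodup.of_map _ (pvKeep_nodup_aux _ _ le_rfl)
    · intro v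
      rw [pvKeep_mem_aux _ _ le_rfl v, pvKeep_mem_aux _ _ le_rfl v, pv_filter_sorted]
  · exact pvAdj_none_lt _ hS
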